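-- pv_equiv track=rewrite | github.com/Mustapha7018/A2SV-Competitive-Programming | camp2/contest/H_Maximal AND.py | maximalAND
-- ===== SOURCE A (Python) =====
-- def maximalAND(n, k, array) -> int:
--
--     bitmask = [0] * 31
--     res = 0
--
--     for num in array:
--         for i in range(31):
--             if num & 1:
--                 bitmask[i]+=1
--
--             num >>= 1
--
--
--     for i in range(30,-1,-1):
--         curr = n - bitmask[i]
--
--         if k >= curr:
--             res += pow(2, i)
--             k -= curr
--
--     return res
-- ===== SOURCE B (Python) =====
-- def maximalAND(n, k, array) -> int:
--     # recursive greedy: decide each bit top-down, thread the budget down the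
--     # recursion, assemble the result bottom-up on the way back; no count table
--     def go(i, budget):
--         if i < 0:
--             return 0, budget
--         cost = n
--         for x in array:
--             if (x >> i) & 1:
--                 cost -= 1
--         if budget >= cost:
--             lower, rest = go(i - 1, budget - cost)
--             return (1 << i) + lower, rest
--         return go(i - 1, budget)
--     return go(30, k)[0]
-- ===== Notes on version B (the rewrite author's own statement) =====
-- stated objective: alternative
-- what changed: Replaced A's two staged passes (build a 31-entry bit-count table by shifting each number, then an iterative greedy loop with a running accumulator) with a single recursive function that decides one bit per call, threads the budget down the recursion and assembles the result bottom-up on return, recounting the current bit's cost in place with no table.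
import Mathlib
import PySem

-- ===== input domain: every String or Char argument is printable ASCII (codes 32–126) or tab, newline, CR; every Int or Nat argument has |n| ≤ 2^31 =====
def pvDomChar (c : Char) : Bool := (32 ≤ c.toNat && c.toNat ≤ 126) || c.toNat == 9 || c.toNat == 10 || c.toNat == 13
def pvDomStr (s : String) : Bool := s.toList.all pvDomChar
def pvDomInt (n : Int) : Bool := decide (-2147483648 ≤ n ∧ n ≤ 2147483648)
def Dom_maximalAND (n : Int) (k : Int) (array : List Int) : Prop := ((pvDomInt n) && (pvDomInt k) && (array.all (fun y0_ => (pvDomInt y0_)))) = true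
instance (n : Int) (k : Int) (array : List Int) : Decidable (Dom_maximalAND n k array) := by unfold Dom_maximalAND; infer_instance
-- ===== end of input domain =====

-- B replaces A's table-then-loop greedy with a single recursive function that decides
-- one bit per call, threads the budget down and assembles the result on return
-- (objective: alternative decomposition, same cost).

-- ===== PORT A =====
-- inner 'for i in range(31)' body: conditionally bump bitmask[i], then num >>= 1
def innerStepA (st : List Int × Int) (i : Int) : List Int × Int :=
  ( if PySem.Int.band st.2 1 ≠ 0
      then PySem.List.pySetD st.1 i (PySem.List.pyGetD st.1 i 0 + 1)
      else st.1,
    st.2 >>> (1 : Nat) )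

-- one iteration of 'for num in array': run the inner loop, keep the table
def tableStepA (bm : List Int) (num : Int) : List Int :=
  ((PySem.List.pyRange 0 31 1).foldl innerStepA (bm, num)).1

def maximalAND (n : Int) (k : Int) (array : List Int) : Int :=
  let bitmask := array.foldl tableStepA (List.replicate 31 0)
  -- for i in range(30,-1,-1): i stays ≥ 0, so pow(2, i) = 2 ^ i.toNat exactly
  (((PySem.List.pyRange 30 (-1) (-1)).foldl (fun (st : Int × Int) i =>
      let curr := n - PySem.List.pyGetD bitmask i 0
      if st.2 ≥ curr then (st.1 + 2 ^ i.toNat, st.2 - curr) else st) (0, k)).1)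

-- ===== PORT B =====
-- go(i, budget): fuel c = i+1 (c = 0 is Python's 'i < 0' base case); bit index is c-1.
-- 'cost = n; for x in array: if (x >> i) & 1: cost -= 1' is the inner foldl.
def goB (n : Int) (array : List Int) : Nat → Int → Int × Int
  | 0, budget => (0, budget)
  | c + 1, budget =>
      let cost := array.foldl
        (fun acc (x : Int) => if PySem.Int.band (x >>> c) 1 ≠ 0 then acc - 1 else acc) n
      if budget ≥ cost then
        let r := goB n array c (budget - cost)
        (((1 : Int) <<< c) + r.1, r.2)
      else goB n array c budget

def maximalAND_alt (n : Int) (k : Int) (array : List Int) : Int :=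
  (goB n array 31 k).1

-- ===== PRECONDITION & SPEC =====
def Spec_maximalAND (n : Int) (k : Int) (array : List Int) (out : Int) : Prop := out = maximalAND_alt n k array
instance (n : Int) (k : Int) (array : List Int) (out : Int) : Decidable (Spec_maximalAND n k array out) := by unfold Spec_maximalAND; infer_instance

-- ===== CLAIM (what is proved, stated in full; the proofs are below) =====
def Claim_equal_maximalAND : Prop := ∀ (n : Int) (k : Int) (array : List Int), Dom_maximalAND n k array → Spec_maximalAND n k array (maximalAND n k array)

-- ===== LEMMAS AND PROOFS =====

-- per-bit count of set bits, the common yardstick of both proofs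
def countBit (array : List Int) (t : Nat) : Int :=
  array.foldl (fun acc (num : Int) => if PySem.Int.band (num >>> t) 1 ≠ 0 then acc + 1 else acc) 0

lemma innerStepA_fst (st : List Int × Int) (i : Int) :
    (innerStepA st i).1 = if PySem.Int.band st.2 1 ≠ 0
      then PySem.List.pySetD st.1 i (PySem.List.pyGetD st.1 i 0 + 1) else st.1 := rfl

lemma innerStepA_snd (st : List Int × Int) (i : Int) :
    (innerStepA st i).2 = st.2 >>> (1 : Nat) := rfl

-- pulling the accumulator out of a conditional-count fold
lemma foldl_count_shift (p : Int → Prop) [DecidablePred p] (xs : List Int) (a : Int) :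
    xs.foldl (fun acc num => if p num then acc + 1 else acc) a
      = a + xs.foldl (fun acc num => if p num then acc + 1 else acc) 0 := by
  induction xs generalizing a with
  | nil => simp
  | cons x xs ih =>
      simp only [List.foldl_cons]
      rw [ih, ih (if p x then 0 + 1 else 0)]
      split_ifs <;> ring

-- splitting off the head of the set-bit count
lemma countBit_cons (x : Int) (xs : List Int) (t : Nat) :
    countBit (x :: xs) t
      = (if PySem.Int.band (x >>> t) 1 ≠ 0 then (1 : Int) else 0) + countBit xs t := by
  unfold countBit
  rw [List.foldl_cons, foldl_count_shift (fun num => PySem.Int.band (num >>> t) 1 ≠ 0)]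
  split_ifs <;> ring

-- B's decremental cost scan equals n minus the set-bit count
lemma costB_eq (array : List Int) (n : Int) (t : Nat) :
    array.foldl (fun acc (x : Int) => if PySem.Int.band (x >>> t) 1 ≠ 0 then acc - 1 else acc) n
      = n - countBit array t := by
  induction array generalizing n with
  | nil => simp [countBit]
  | cons x xs ih =>
      rw [List.foldl_cons, ih, countBit_cons]
      split_ifs <;> ring

-- specification of A's inner bit-extraction loop after c of its 31 steps
lemma innerA_spec (m : Int) (c : Nat) (bm : List Int) (h : bm.length = 31) (hc : c ≤ 31) :
    (((PySem.List.pyRange 0 (c : Int) 1).foldl innerStepA (bm, m)).2 = m >>> c)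
    ∧ (((PySem.List.pyRange 0 (c : Int) 1).foldl innerStepA (bm, m)).1.length = 31)
    ∧ ∀ j : Nat, ((PySem.List.pyRange 0 (c : Int) 1).foldl innerStepA (bm, m)).1.getD j 0
        = bm.getD j 0 + (if j < c ∧ PySem.Int.band (m >>> j) 1 ≠ 0 then (1 : Int) else 0) := by
  induction c with
  | zero =>
      rw [show ((0 : Nat) : Int) = 0 by norm_num, PySem.List.pyRange_one_eq_nil (by norm_num)]
      simp [h]
  | succ c ih =>
      obtain ⟨ih2, ihlen, ih1⟩ := ih (by omega)
      have hstep : PySem.List.pyRange 0 ((c + 1 : Nat) : Int) 1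
          = PySem.List.pyRange 0 (c : Int) 1 ++ [(c : Int)] := by
        push_cast
        exact PySem.List.pyRange_one_succ_right (by positivity)
      rw [hstep, List.foldl_append, List.foldl_cons, List.foldl_nil]
      set st := (PySem.List.pyRange 0 (c : Int) 1).foldl innerStepA (bm, m) with hst
      refine ⟨?_, ?_, ?_⟩
      · rw [innerStepA_snd, ih2]
        simp [Int.shiftRight_add]
      · rw [innerStepA_fst]
        split_ifs <;> simp [PySem.List.pySetD_natCast, ihlen]
      · intro j
        rw [innerStepA_fst, ih2]
        by_cases hb : PySem.Int.band (m >>> c) 1 ≠ 0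
        · rw [if_pos hb]
          simp only [PySem.List.pySetD_natCast, PySem.List.pyGetD_natCast]
          by_cases hjc : j = c
          · subst hjc
            rw [List.getD_eq_getElem?_getD, List.getElem?_set_self (by rw [ihlen]; omega),
              Option.getD_some, ih1 j]
            rw [if_neg (show ¬(j < j ∧ PySem.Int.band (m >>> j) 1 ≠ 0) from
                  fun hh => absurd hh.1 (lt_irrefl j)),
              if_pos (show j < j + 1 ∧ PySem.Int.band (m >>> j) 1 ≠ 0 from
                  ⟨Nat.lt_succ_self j, hb⟩)]
            ring
          · rw [List.getD_eq_getElem?_getD, List.getElem?_set_ne (by omega),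
              ← List.getD_eq_getElem?_getD, ih1 j]
            have hiff : (j < c ∧ PySem.Int.band (m >>> j) 1 ≠ 0)
                ↔ (j < c + 1 ∧ PySem.Int.band (m >>> j) 1 ≠ 0) := by
              constructor <;> rintro ⟨h1, h2⟩ <;> exact ⟨by omega, h2⟩
            rw [if_congr hiff rfl rfl]
        · rw [if_neg hb, ih1 j]
          have hiff : (j < c ∧ PySem.Int.band (m >>> j) 1 ≠ 0)
              ↔ (j < c + 1 ∧ PySem.Int.band (m >>> j) 1 ≠ 0) := by
            constructor
            · rintro ⟨h1, h2⟩; exact ⟨by omega, h2⟩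
            · rintro ⟨h1, h2⟩
              refine ⟨?_, h2⟩
              rcases Nat.lt_succ_iff_lt_or_eq.mp h1 with hlt | heq
              · exact hlt
              · exact absurd (heq ▸ h2) hb
          rw [if_congr hiff rfl rfl]

-- A's per-number table update adds exactly the indicator of each bit
lemma tableStepA_spec (bm : List Int) (num : Int) (h : bm.length = 31) :
    (tableStepA bm num).length = 31
    ∧ ∀ j : Nat, j < 31 → (tableStepA bm num).getD j 0
        = bm.getD j 0 + (if PySem.Int.band (num >>> j) 1 ≠ 0 then (1 : Int) else 0) := by
  have h := innerA_spec num 31 bm h (le_refl _)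
  rw [show ((31 : Nat) : Int) = 31 by norm_num] at h
  unfold tableStepA
  exact ⟨h.2.1, fun j hj => by rw [h.2.2 j]; simp [hj]⟩

-- A's full table holds the per-bit counts
lemma tableA_spec (arr : List Int) (bm : List Int) (h : bm.length = 31) :
    (arr.foldl tableStepA bm).length = 31
    ∧ ∀ j : Nat, j < 31 → (arr.foldl tableStepA bm).getD j 0 = bm.getD j 0 + countBit arr j := by
  induction arr generalizing bm with
  | nil => simp [h, countBit]
  | cons x xs ih =>
      obtain ⟨hlen, hstep⟩ := tableStepA_spec bm x h
      obtain ⟨hlen', hrec⟩ := ih (tableStepA bm x) hlen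
      refine ⟨hlen', fun j hj => ?_⟩
      rw [List.foldl_cons, hrec j hj, hstep j hj]
      rw [countBit_cons]
      ring

-- A's countdown greedy fold over bits c-1 … 0 computes exactly B's recursion at fuel c
lemma greedy_eq_goB (n : Int) (array : List Int) (bitmask : List Int)
    (htab : ∀ j : Nat, j < 31 → PySem.List.pyGetD bitmask (j : Int) 0 = countBit array j)
    (c : Nat) (hc : c ≤ 31) (r b : Int) :
    (PySem.List.pyRange ((c : Int) - 1) (-1) (-1)).foldl (fun (st : Int × Int) i =>
        let curr := n - PySem.List.pyGetD bitmask i 0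
        if st.2 ≥ curr then (st.1 + 2 ^ i.toNat, st.2 - curr) else st) (r, b)
      = (r + (goB n array c b).1, (goB n array c b).2) := by
  induction c generalizing r b with
  | zero =>
      rw [show ((0 : Nat) : Int) - 1 = -1 by norm_num,
        PySem.List.pyRange_neg_one_eq_nil (by norm_num)]
      simp [goB]
  | succ c ih =>
      have hfix : ((c + 1 : Nat) : Int) - 1 = ((c : Nat) : Int) := by push_cast; ring
      rw [hfix, PySem.List.pyRange_neg_one_cons (by omega), List.foldl_cons]
      have hcurr : PySem.List.pyGetD bitmask ((c : Nat) : Int) 0 = countBit array c :=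
        htab c (by omega)
      have hcost : goB n array (c + 1) b
          = (if b ≥ n - countBit array c then
              (((1 : Int) <<< c) + (goB n array c (b - (n - countBit array c))).1,
               (goB n array c (b - (n - countBit array c))).2)
             else goB n array c b) := by
        simp only [goB, costB_eq]
      simp only [hcurr, hcost, Int.toNat_natCast]
      by_cases hb : b ≥ n - countBit array c
      · rw [if_pos hb, if_pos hb, ih (by omega)]
        have h2 : (2 : Int) ^ c = ((1 : Int) <<< c) := by
          rw [Int.shiftLeft_eq, one_mul]
        rw [h2]
        refine Prod.ext ?_ rfl
        simp only
        ring
      · rw [if_neg hb, if_neg hb, ih (by omega)]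

-- ===== VERDICT (by name: the statement is the Claim_ definition above) =====
theorem maximalAND_spec : Claim_equal_maximalAND := by
  intro n k array _
  unfold Spec_maximalAND
  simp only [maximalAND, maximalAND_alt]
  obtain ⟨_, htab⟩ := tableA_spec array (List.replicate 31 0) (by simp)
  have htab' : ∀ j : Nat, j < 31 →
      PySem.List.pyGetD (array.foldl tableStepA (List.replicate 31 0)) (j : Int) 0
        = countBit array j := by
    intro j hj
    rw [PySem.List.pyGetD_natCast, htab j hj]
    have hrep : (List.replicate 31 (0:Int)).getD j 0 = 0 := by
      rw [List.getD_eq_getElem?_getD, List.getElem?_replicate]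
      split_ifs <;> rfl
    rw [hrep, zero_add]
  have h := greedy_eq_goB n array (array.foldl tableStepA (List.replicate 31 0)) htab' 31
    (le_refl _) 0 k
  rw [show ((31 : Nat) : Int) - 1 = 30 by norm_num] at h
  rw [h, zero_add]
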